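-- pv_equiv track=rewrite | github.com/tobiasHeinke/demo | regex.py | checkSinguInner
-- ===== SOURCE A (Python) =====
-- def checkSinguInner(matchOut, fmatch, o):
-- 	i = 0
-- 	while i < len(matchOut):
-- 		if i != o and matchOut[i] == fmatch:
-- 			return True
-- 		else:
-- 			i = i + 1
-- 	return False
-- ===== SOURCE B (Python) =====
-- def checkSinguInner(matchOut, fmatch, o):
--     total = matchOut.count(fmatch)
--     if 0 <= o < len(matchOut) and matchOut[o] == fmatch:
--         total -= 1
--     return total > 0
-- ===== Notes on version B (the rewrite author's own statement) =====
-- stated objective: simpler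
-- what changed: Replaces A's guarded index-by-index scan with early return by a count-then-correct formulation: count all occurrences once, subtract the excluded index's contribution if o is a valid index holding fmatch, and compare with zero.
import Mathlib
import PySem

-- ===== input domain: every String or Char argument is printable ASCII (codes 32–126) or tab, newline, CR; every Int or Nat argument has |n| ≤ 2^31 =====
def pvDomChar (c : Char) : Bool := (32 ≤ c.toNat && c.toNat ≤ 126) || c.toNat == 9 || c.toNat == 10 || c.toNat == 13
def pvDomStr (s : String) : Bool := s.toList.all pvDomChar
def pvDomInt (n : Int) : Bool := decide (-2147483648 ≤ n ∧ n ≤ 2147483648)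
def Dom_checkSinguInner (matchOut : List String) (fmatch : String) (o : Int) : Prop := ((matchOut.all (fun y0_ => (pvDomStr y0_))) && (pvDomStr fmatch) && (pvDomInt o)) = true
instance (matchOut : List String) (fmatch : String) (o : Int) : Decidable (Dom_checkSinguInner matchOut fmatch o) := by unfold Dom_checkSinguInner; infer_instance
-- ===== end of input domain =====

-- B replaces A's guarded index-by-index scan by a count-then-correct formulation (same O(n) cost, plainer).

-- ===== PORT A =====
-- the while loop: scan with index i, return True on the first i ≠ o with matchOut[i] == fmatch
def checkSinguInnerAux (fmatch : String) (o : Int) : List String → Int → Bool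
  | [], _ => false
  | x :: xs, i => if i ≠ o ∧ x = fmatch then true else checkSinguInnerAux fmatch o xs (i + 1)

def checkSinguInner (matchOut : List String) (fmatch : String) (o : Int) : Bool :=
  checkSinguInnerAux fmatch o matchOut 0

-- ===== PORT B =====
def checkSinguInner_alt (matchOut : List String) (fmatch : String) (o : Int) : Bool :=
  let total : Int := (PySem.List.count matchOut fmatch : Int)
  let total : Int :=
    if 0 ≤ o ∧ o < matchOut.length ∧ PySem.List.pyGet? matchOut o = some fmatch then total - 1
    else total
  decide (total > 0)

-- ===== PRECONDITION & SPEC =====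
def Spec_checkSinguInner (matchOut : List String) (fmatch : String) (o : Int) (out : Bool) : Prop := out = checkSinguInner_alt matchOut fmatch o
instance (matchOut : List String) (fmatch : String) (o : Int) (out : Bool) : Decidable (Spec_checkSinguInner matchOut fmatch o out) := by unfold Spec_checkSinguInner; infer_instance

-- ===== CLAIM (what is proved, stated in full; the proofs are below) =====
def Claim_equal_checkSinguInner : Prop := ∀ (matchOut : List String) (fmatch : String) (o : Int), Dom_checkSinguInner matchOut fmatch o → Spec_checkSinguInner matchOut fmatch o (checkSinguInner matchOut fmatch o)

-- ===== LEMMAS AND PROOFS =====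

-- the "correction" term of B, generalized to an arbitrary excluded position j
def pvCorr (l : List String) (fmatch : String) (j : Int) : Int :=
  if 0 ≤ j ∧ j < l.length ∧ PySem.List.pyGet? l j = some fmatch then 1 else 0

lemma pyGet?_cons_pos (x : String) (xs : List String) (j : Int) (hj : 0 < j) :
    PySem.List.pyGet? (x :: xs) j = PySem.List.pyGet? xs (j - 1) := by
  rw [PySem.List.pyGet?_of_nonneg _ (by omega), PySem.List.pyGet?_of_nonneg _ (by omega)]
  have ht : j.toNat = (j - 1).toNat + 1 := by omega
  rw [ht]; simp

lemma corr_cons (x fmatch : String) (xs : List String) (j : Int) :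
    pvCorr (x :: xs) fmatch j
      = if j = 0 then (if x = fmatch then 1 else 0) else pvCorr xs fmatch (j - 1) := by
  by_cases hz : j = 0
  · subst hz
    rw [if_pos rfl]
    simp [pvCorr]
  · rw [if_neg hz]
    by_cases hpos : 0 < j
    · rw [pvCorr, pvCorr, pyGet?_cons_pos x xs j hpos]
      apply if_congr _ rfl rfl
      simp only [List.length_cons]
      push_cast
      constructor <;> rintro ⟨a, b, c⟩ <;> exact ⟨by omega, by omega, c⟩
    · rw [pvCorr, pvCorr, if_neg (by rintro ⟨a, _, _⟩; omega),
        if_neg (by rintro ⟨a, _, _⟩; omega)]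

lemma corr_le_count (l : List String) (fmatch : String) (j : Int) :
    pvCorr l fmatch j ≤ (PySem.List.count l fmatch : Int) := by
  rw [pvCorr]
  split_ifs with h
  · have hm := PySem.List.mem_of_pyGet?_eq_some l h.2.2
    have := List.count_pos_iff.mpr hm
    rw [PySem.List.count_eq]
    omega
  · positivity

lemma auxA_eq_count (fmatch : String) (o : Int) (l : List String) (i : Int) :
    checkSinguInnerAux fmatch o l i
      = decide ((PySem.List.count l fmatch : Int) - pvCorr l fmatch (o - i) > 0) := by
  induction l generalizing i with
  | nil =>
    rw [checkSinguInnerAux, pvCorr, if_neg (by rintro ⟨_, b, _⟩; simp at b; omega)]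
    simp [PySem.List.count_eq]
  | cons x xs ih =>
    rw [checkSinguInnerAux, ih, corr_cons]
    have harith : o - (i + 1) = o - i - 1 := by ring
    by_cases hx : x = fmatch
    · have hcount : (PySem.List.count (x :: xs) fmatch : Int)
          = (PySem.List.count xs fmatch : Int) + 1 := by
        simp [PySem.List.count_eq, hx]
      by_cases ho : i = o
      · have hz : o - i = 0 := by omega
        rw [if_neg (by tauto), if_pos hz, if_pos hx, hcount, harith, hz]
        rw [pvCorr, if_neg (by rintro ⟨a, _, _⟩; omega)]
        norm_num
      · rw [if_pos ⟨ho, hx⟩]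
        have hz : ¬ o - i = 0 := by omega
        rw [if_neg hz, hcount]
        have h1 := corr_le_count xs fmatch (o - i - 1)
        symm; rw [decide_eq_true_iff]; omega
    · have hcount : (PySem.List.count (x :: xs) fmatch : Int)
          = (PySem.List.count xs fmatch : Int) := by
        simp [PySem.List.count_eq, hx]
      rw [if_neg (by tauto), hcount, harith]
      by_cases hz : o - i = 0
      · rw [if_pos hz, if_neg hx, hz]
        rw [pvCorr, if_neg (by rintro ⟨a, _, _⟩; omega)]
      · rw [if_neg hz]

-- ===== VERDICT (by name: the statement is the Claim_ definition above) =====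
theorem checkSinguInner_spec : Claim_equal_checkSinguInner := by
  intro matchOut fmatch o _
  unfold Spec_checkSinguInner checkSinguInner checkSinguInner_alt
  rw [auxA_eq_count]
  simp only [sub_zero, pvCorr]
  split_ifs <;> simp
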